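-- pv_equiv track=rewrite | github.com/mynkpdr/samgeo3-demo | get_data.py | select_dates
-- ===== SOURCE A (Python) =====
-- def select_dates(
--     available_dates: set, min_date: str, max_date: str, target: int
-- ) -> list:
--     """Select dates within the timeframe, prioritising one per year, up to the target count."""
--     valid_dates = [d for d in available_dates if min_date <= d <= max_date]
--     dates = sorted(list(set(valid_dates)), reverse=True)
--
--     selected = []
--     seen_years = set()
--     remaining = []
--
--     for d in dates:
--         year = d[:4]
--         if year not in seen_years:
--             selected.append(d)
--             seen_years.add(year)
--         else:
--             remaining.append(d)
--
--     for d in remaining: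
--         if len(selected) >= target:
--             break
--         selected.append(d)
--
--     return selected[:target]
-- ===== SOURCE B (Python) =====
-- def select_dates(available_dates, min_date, max_date, target):
--     groups = {}
--     for d in set(available_dates):
--         if min_date <= d <= max_date:
--             groups.setdefault(d[:4], []).append(d)
--     selected = sorted((max(v) for v in groups.values()), reverse=True)
--     pool = sorted((d for v in groups.values() for d in v if d != max(v)), reverse=True)
--     for d in pool:
--         if len(selected) >= target:
--             break
--         selected.append(d)
--     return selected[:target]
-- ===== Notes on version B (the rewrite author's own statement) =====
-- stated objective: alternative
-- what changed: A sorts all in-range dates once and splits them in a single seen-years scan; B instead groups the in-range deduplicated dates into a dict keyed by year, takes each group's max as a representative and sorts representatives and the leftover fill pool separately, then runs the same fill loop and [:target] slice.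
import Mathlib
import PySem

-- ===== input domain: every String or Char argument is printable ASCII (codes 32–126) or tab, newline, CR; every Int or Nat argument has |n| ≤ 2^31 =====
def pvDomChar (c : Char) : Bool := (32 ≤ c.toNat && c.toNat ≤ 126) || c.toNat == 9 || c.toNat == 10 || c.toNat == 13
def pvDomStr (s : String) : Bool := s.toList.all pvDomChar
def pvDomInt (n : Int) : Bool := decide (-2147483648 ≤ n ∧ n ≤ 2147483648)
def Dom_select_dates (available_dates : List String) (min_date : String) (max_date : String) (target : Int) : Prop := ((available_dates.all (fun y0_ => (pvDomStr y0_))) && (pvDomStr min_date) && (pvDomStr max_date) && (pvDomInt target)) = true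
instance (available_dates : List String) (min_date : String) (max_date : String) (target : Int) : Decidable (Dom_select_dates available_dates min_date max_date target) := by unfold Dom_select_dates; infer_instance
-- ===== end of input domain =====

-- B replaces A's single sorted split-scan by a year-keyed dict grouping (max per year = the
-- representatives, the rest = the fill pool, each sorted descending) with the same fill loop and
-- final [:target] slice; objective: alternative decomposition, same return value on every input.

-- d[:4] (shared by both ports)
def yearOf (d : String) : String := PySem.Str.slice d none (some 4)

-- ===== PORT A =====
-- the body of A's first for-loop, state (selected, seen_years, remaining)
def stepA (st : List String × PySem.Set String × List String) (d : String) :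
    List String × PySem.Set String × List String :=
  let year := yearOf d
  if PySem.Set.contains st.2.1 year then (st.1, st.2.1, st.2.2 ++ [d])
  else (st.1 ++ [d], PySem.Set.add st.2.1 year, st.2.2)

-- A's second for-loop ('break' = stop the recursion)
def selFillA (target : Int) (selected : List String) : List String → List String
  | [] => selected
  | d :: rest =>
      if target ≤ (selected.length : Int) then selected
      else selFillA target (selected ++ [d]) rest

def select_dates (available_dates : List String) (min_date : String) (max_date : String) (target : Int) : List String :=
  let valid_dates := available_dates.filter (fun d => decide (min_date ≤ d) && decide (d ≤ max_date))
  let dates := PySem.List.sorted (PySem.Set.ofList valid_dates) (fun x => x) true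
  let st := dates.foldl stepA ([], PySem.Set.empty, [])
  PySem.List.slice (selFillA target st.1 st.2.2) none (some target)

-- ===== PORT B =====
-- B's grouping loop body: groups.setdefault(d[:4], []).append(d) under the range test
def stepB (min_date max_date : String) (g : PySem.Dict String (List String)) (d : String) :
    PySem.Dict String (List String) :=
  if decide (min_date ≤ d) && decide (d ≤ max_date) then
    g.modify (yearOf d) [] (fun v => v ++ [d])
  else g

-- B's fill loop (the same loop Source B runs)
def selFillB (target : Int) (selected : List String) : List String → List String
  | [] => selected
  | d :: rest =>
      if target ≤ (selected.length : Int) then selected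
      else selFillB target (selected ++ [d]) rest

def select_dates_alt (available_dates : List String) (min_date : String) (max_date : String) (target : Int) : List String :=
  let groups := (PySem.Set.ofList available_dates).foldl (stepB min_date max_date) PySem.Dict.empty
  -- max(v): every group is nonempty by construction, so Python's max never raises; .getD "" is never taken
  let selected := PySem.List.sorted
      (groups.values.map (fun v => (PySem.List.max? v (fun x => x)).getD "")) (fun x => x) true
  let pool := PySem.List.sorted
      (groups.values.flatMap (fun v =>
        v.filter (fun x => decide (x ≠ (PySem.List.max? v (fun y => y)).getD "")))) (fun x => x) true
  PySem.List.slice (selFillB target selected pool) none (some target)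

-- ===== PRECONDITION & SPEC =====
def Spec_select_dates (available_dates : List String) (min_date : String) (max_date : String) (target : Int) (out : List String) : Prop := out = select_dates_alt available_dates min_date max_date target
instance (available_dates : List String) (min_date : String) (max_date : String) (target : Int) (out : List String) : Decidable (Spec_select_dates available_dates min_date max_date target out) := by unfold Spec_select_dates; infer_instance

-- ===== CLAIM (what is proved, stated in full; the proofs are below) =====
def Claim_equal_select_dates : Prop := ∀ (available_dates : List String) (min_date : String) (max_date : String) (target : Int), Dom_select_dates available_dates min_date max_date target → Spec_select_dates available_dates min_date max_date target (select_dates available_dates min_date max_date target)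

-- ===== LEMMAS AND PROOFS =====

theorem contains_true (s : PySem.Set String) (x : String) (h : x ∈ s) : PySem.Set.contains s x = true :=
  (PySem.Set.contains_iff s x).mpr h

-- the two fill loops are the same loop
theorem selFillA_eq_selFillB (target : Int) (sel xs : List String) :
    selFillA target sel xs = selFillB target sel xs := by
  induction xs generalizing sel with
  | nil => rfl
  | cons d rest ih => simp only [selFillA, selFillB]; split_ifs <;> simp [ih]

-- A's first loop, split into its two output streams
def splitF (seen : PySem.Set String) : List String → List String
  | [] => []
  | d :: r =>
      if PySem.Set.contains seen (yearOf d) then splitF seen r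
      else d :: splitF (PySem.Set.add seen (yearOf d)) r

def splitR (seen : PySem.Set String) : List String → List String
  | [] => []
  | d :: r =>
      if PySem.Set.contains seen (yearOf d) then d :: splitR seen r
      else splitR (PySem.Set.add seen (yearOf d)) r

def seenAfter (seen : PySem.Set String) : List String → PySem.Set String
  | [] => seen
  | d :: r =>
      if PySem.Set.contains seen (yearOf d) then seenAfter seen r
      else seenAfter (PySem.Set.add seen (yearOf d)) r

theorem foldA_eq (xs : List String) : ∀ (sel : List String) (seen : PySem.Set String) (rem : List String),
    xs.foldl stepA (sel, seen, rem) =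
      (sel ++ splitF seen xs, seenAfter seen xs, rem ++ splitR seen xs) := by
  induction xs with
  | nil => intro sel seen rem; simp [splitF, splitR, seenAfter]
  | cons d r ih =>
      intro sel seen rem
      simp only [List.foldl_cons, stepA, splitF, splitR, seenAfter]
      by_cases h : yearOf d ∈ seen
      · simp [h, ih]
      · simp [h, ih]

theorem splitF_sublist (seen : PySem.Set String) (xs : List String) : (splitF seen xs).Sublist xs := by
  induction xs generalizing seen with
  | nil => simp [splitF]
  | cons d r ih =>
      simp only [splitF]
      split_ifs with h
      · exact (ih seen).cons d
      · exact (ih _).cons₂ d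

theorem splitR_sublist (seen : PySem.Set String) (xs : List String) : (splitR seen xs).Sublist xs := by
  induction xs generalizing seen with
  | nil => simp [splitR]
  | cons d r ih =>
      simp only [splitR]
      split_ifs with h
      · exact (ih seen).cons₂ d
      · exact (ih _).cons d

theorem mem_splitF (xs : List String) : ∀ (seen : PySem.Set String) (d : String),
    xs.Pairwise (fun a b => b < a) →
    (d ∈ splitF seen xs ↔ d ∈ xs ∧ yearOf d ∉ seen ∧
      ∀ e ∈ xs, yearOf e = yearOf d → e ≤ d) := by
  induction xs with
  | nil => intro seen d _; simp [splitF]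
  | cons x r ih =>
      intro seen d hs
      have hgt : ∀ e ∈ r, e < x := fun e he => (List.pairwise_cons.mp hs).1 e he
      have hr := (List.pairwise_cons.mp hs).2
      simp only [splitF]
      by_cases h : yearOf x ∈ seen
      · rw [if_pos (contains_true _ _ h), ih seen d hr]
        constructor
        · rintro ⟨hd, hc, hall⟩
          refine ⟨List.mem_cons_of_mem _ hd, hc, ?_⟩
          intro e he hy
          rcases List.mem_cons.mp he with rfl | he'
          · exact absurd (hy ▸ h) hc
          · exact hall e he' hy
        · rintro ⟨hd, hc, hall⟩
          rcases List.mem_cons.mp hd with rfl | hd'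
          · exact absurd h hc
          · exact ⟨hd', hc, fun e he hy => hall e (List.mem_cons_of_mem _ he) hy⟩
      · rw [if_neg (fun hc => h ((PySem.Set.contains_iff _ _).mp hc))]
        rw [List.mem_cons, ih _ d hr]
        constructor
        · rintro (rfl | ⟨hd, hc, hall⟩)
          · refine ⟨List.mem_cons_self, h, ?_⟩
            intro e he hy
            rcases List.mem_cons.mp he with rfl | he'
            · exact le_refl _
            · exact le_of_lt (hgt e he')
          · have hyx : yearOf d ≠ yearOf x := fun hyy =>
              hc ((PySem.Set.mem_add seen (yearOf x) (yearOf d)).mpr (Or.inr hyy))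
            have hns : yearOf d ∉ seen := fun hm =>
              hc ((PySem.Set.mem_add seen (yearOf x) (yearOf d)).mpr (Or.inl hm))
            refine ⟨List.mem_cons_of_mem _ hd, hns, ?_⟩
            intro e he hy
            rcases List.mem_cons.mp he with rfl | he'
            · exact absurd hy.symm hyx
            · exact hall e he' hy
        · rintro ⟨hd, hc, hall⟩
          rcases List.mem_cons.mp hd with rfl | hd'
          · exact Or.inl rfl
          · right
            have hdx : d ≠ x := fun hh => absurd (hh ▸ hgt d hd') (lt_irrefl x)
            have hyx : yearOf x ≠ yearOf d := by
              intro hyy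
              have := hall x List.mem_cons_self hyy
              exact absurd (lt_of_le_of_lt this (hgt d hd')) (lt_irrefl x)
            refine ⟨hd', ?_, fun e he hy => hall e (List.mem_cons_of_mem _ he) hy⟩
            intro hmem
            rcases (PySem.Set.mem_add seen (yearOf x) (yearOf d)).mp hmem with hm | hm
            · exact hc hm
            · exact hyx hm.symm

theorem mem_splitR (xs : List String) : ∀ (seen : PySem.Set String) (d : String),
    xs.Pairwise (fun a b => b < a) →
    (d ∈ splitR seen xs ↔ d ∈ xs ∧ (yearOf d ∈ seen ∨
      ∃ e ∈ xs, yearOf e = yearOf d ∧ d < e)) := by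
  induction xs with
  | nil => intro seen d _; simp [splitR]
  | cons x r ih =>
      intro seen d hs
      have hgt : ∀ e ∈ r, e < x := fun e he => (List.pairwise_cons.mp hs).1 e he
      have hr := (List.pairwise_cons.mp hs).2
      simp only [splitR]
      by_cases h : yearOf x ∈ seen
      · rw [if_pos (contains_true _ _ h), List.mem_cons, ih seen d hr]
        constructor
        · rintro (rfl | ⟨hd, hc⟩)
          · exact ⟨List.mem_cons_self, Or.inl h⟩
          · refine ⟨List.mem_cons_of_mem _ hd, ?_⟩
            rcases hc with hc | ⟨e, he, hy, hlt⟩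
            · exact Or.inl hc
            · exact Or.inr ⟨e, List.mem_cons_of_mem _ he, hy, hlt⟩
        · rintro ⟨hd, hc⟩
          rcases List.mem_cons.mp hd with rfl | hd'
          · exact Or.inl rfl
          · right
            refine ⟨hd', ?_⟩
            rcases hc with hc | ⟨e, he, hy, hlt⟩
            · exact Or.inl hc
            · rcases List.mem_cons.mp he with rfl | he'
              · exact Or.inl (hy ▸ h)
              · exact Or.inr ⟨e, he', hy, hlt⟩
      · rw [if_neg (fun hc => h ((PySem.Set.contains_iff _ _).mp hc)), ih _ d hr]
        constructor
        · rintro ⟨hd, hc⟩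
          refine ⟨List.mem_cons_of_mem _ hd, ?_⟩
          rcases hc with hc | ⟨e, he, hy, hlt⟩
          · rcases (PySem.Set.mem_add seen (yearOf x) (yearOf d)).mp hc with hm | hm
            · exact Or.inl hm
            · exact Or.inr ⟨x, List.mem_cons_self, hm.symm, hgt d hd⟩
          · exact Or.inr ⟨e, List.mem_cons_of_mem _ he, hy, hlt⟩
        · rintro ⟨hd, hc⟩
          rcases List.mem_cons.mp hd with rfl | hd'
          · exfalso
            rcases hc with hc | ⟨e, he, hy, hlt⟩
            · exact h hc
            · rcases List.mem_cons.mp he with rfl | he'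
              · exact absurd hlt (lt_irrefl _)
              · exact absurd (lt_trans hlt (hgt e he')) (lt_irrefl _)
          · refine ⟨hd', ?_⟩
            rcases hc with hc | ⟨e, he, hy, hlt⟩
            · exact Or.inl ((PySem.Set.mem_add seen (yearOf x) (yearOf d)).mpr (Or.inl hc))
            · rcases List.mem_cons.mp he with rfl | he'
              · exact Or.inl ((PySem.Set.mem_add seen (yearOf e) (yearOf d)).mpr (Or.inr hy.symm))
              · exact Or.inr ⟨e, he', hy, hlt⟩

-- ---- B-side: the groups dict ----

theorem groups_getD (mn mx : String) (y : String) : ∀ (zs : List String) (g : PySem.Dict String (List String)),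
    (zs.foldl (stepB mn mx) g).getD y [] =
      g.getD y [] ++ zs.filter (fun d => (decide (mn ≤ d) && decide (d ≤ mx)) && (yearOf d == y)) := by
  intro zs
  induction zs with
  | nil => intro g; simp
  | cons z r ih =>
      intro g
      simp only [List.foldl_cons, List.filter_cons]
      by_cases hp : (decide (mn ≤ z) && decide (z ≤ mx)) = true
      · by_cases hy : yearOf z = y
        · subst hy
          simp only [hp, Bool.true_and, beq_self_eq_true, if_pos]
          rw [show stepB mn mx g z = g.modify (yearOf z) [] (fun v => v ++ [z]) by unfold stepB; rw [if_pos hp]]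
          rw [ih, PySem.Dict.getD_modify]
          simp
        · have hby : (yearOf z == y) = false := by simp [hy]
          simp only [hp, Bool.true_and, hby, if_neg Bool.false_ne_true]
          rw [show stepB mn mx g z = g.modify (yearOf z) [] (fun v => v ++ [z]) by unfold stepB; rw [if_pos hp]]
          rw [ih, PySem.Dict.getD_modify, if_neg (fun hh => hy hh.symm)]
      · have : stepB mn mx g z = g := by unfold stepB; exact if_neg hp
        rw [this, ih]
        simp only [hp, Bool.false_and, if_neg Bool.false_ne_true]

theorem groups_keys_mem (mn mx : String) (y : String) : ∀ (zs : List String) (g : PySem.Dict String (List String)),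
    (y ∈ (zs.foldl (stepB mn mx) g).keys ↔
      y ∈ g.keys ∨ ∃ d ∈ zs, (decide (mn ≤ d) && decide (d ≤ mx)) = true ∧ yearOf d = y) := by
  intro zs
  induction zs with
  | nil => intro g; simp
  | cons z r ih =>
      intro g
      simp only [List.foldl_cons]
      rw [ih]
      by_cases hp : (decide (mn ≤ z) && decide (z ≤ mx)) = true
      · rw [show stepB mn mx g z = g.modify (yearOf z) [] (fun v => v ++ [z]) by unfold stepB; rw [if_pos hp]]
        have hk : y ∈ (g.modify (yearOf z) [] (fun v => v ++ [z])).keys ↔ y = yearOf z ∨ y ∈ g.keys := by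
          rw [PySem.Dict.keys_modify]
          exact PySem.Dict.mem_keys_insert g (yearOf z) y _
        rw [hk]
        constructor
        · rintro ((rfl | hg) | ⟨d, hd, hdp, hdy⟩)
          · exact Or.inr ⟨z, List.mem_cons_self, hp, rfl⟩
          · exact Or.inl hg
          · exact Or.inr ⟨d, List.mem_cons_of_mem _ hd, hdp, hdy⟩
        · rintro (hg | ⟨d, hd, hdp, hdy⟩)
          · exact Or.inl (Or.inr hg)
          · rcases List.mem_cons.mp hd with rfl | hd'
            · exact Or.inl (Or.inl hdy.symm)
            · exact Or.inr ⟨d, hd', hdp, hdy⟩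
      · rw [show stepB mn mx g z = g by unfold stepB; exact if_neg hp]
        constructor
        · rintro (hg | ⟨d, hd, hdp, hdy⟩)
          · exact Or.inl hg
          · exact Or.inr ⟨d, List.mem_cons_of_mem _ hd, hdp, hdy⟩
        · rintro (hg | ⟨d, hd, hdp, hdy⟩)
          · exact Or.inl hg
          · rcases List.mem_cons.mp hd with rfl | hd'
            · exact absurd hdp hp
            · exact Or.inr ⟨d, hd', hdp, hdy⟩

theorem groups_keys_nodup (mn mx : String) : ∀ (zs : List String) (g : PySem.Dict String (List String)),
    g.keys.Nodup → (zs.foldl (stepB mn mx) g).keys.Nodup := by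
  intro zs
  induction zs with
  | nil => intro g h; simpa
  | cons z r ih =>
      intro g h
      simp only [List.foldl_cons]
      apply ih
      unfold stepB
      split_ifs with hp
      · rw [PySem.Dict.keys_modify]
        exact PySem.Dict.nodup_keys_insert g _ _ h
      · exact h

-- ---- assembly ----

theorem ports_agree (ad : List String) (mn mx : String) (t : Int) :
    select_dates ad mn mx t = select_dates_alt ad mn mx t := by
  -- shared notation
  have hGetD := fun y => groups_getD mn mx y (PySem.Set.ofList ad) PySem.Dict.empty
  have hKmem := fun y => groups_keys_mem mn mx y (PySem.Set.ofList ad) PySem.Dict.empty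
  have hKnd := groups_keys_nodup mn mx (PySem.Set.ofList ad) PySem.Dict.empty (by simp)
  set G := (PySem.Set.ofList ad).foldl (stepB mn mx) PySem.Dict.empty with hG
  set xs := PySem.List.sorted
      (PySem.Set.ofList (ad.filter (fun d => decide (mn ≤ d) && decide (d ≤ mx))))
      (fun x : String => x) true with hxs
  -- properties of xs
  have hxs_nodup : xs.Nodup :=
    ((PySem.List.sorted_perm _ _ _).nodup_iff).mpr (PySem.Set.nodup_ofList _)
  have hxs_pw : xs.Pairwise (fun a b => b < a) := by
    have h1 := PySem.List.sorted_pairwise_rev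
      (PySem.Set.ofList (ad.filter (fun d => decide (mn ≤ d) && decide (d ≤ mx)))) (fun x : String => x)
    have h2 : xs.Pairwise (fun a b => a ≠ b) := hxs_nodup
    exact (h1.and h2).imp (fun hab => lt_of_le_of_ne hab.1 (fun hh => hab.2 hh.symm))
  have hxs_mem : ∀ d, d ∈ xs ↔ d ∈ ad ∧ (decide (mn ≤ d) && decide (d ≤ mx)) = true := by
    intro d
    rw [hxs, PySem.List.mem_sorted, PySem.Set.mem_ofList, List.mem_filter]
  -- groups
  have hgrp : ∀ y, G.getD y [] =
      (PySem.Set.ofList ad).filter (fun d => (decide (mn ≤ d) && decide (d ≤ mx)) && (yearOf d == y)) := by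
    intro y; rw [hG, hGetD y, PySem.Dict.getD_empty, List.nil_append]
  have hgrp_mem : ∀ y d, d ∈ G.getD y [] ↔ d ∈ xs ∧ yearOf d = y := by
    intro y d
    rw [hgrp, List.mem_filter, PySem.Set.mem_ofList, hxs_mem]
    constructor
    · rintro ⟨hm, hb⟩
      rcases Bool.and_eq_true_iff.mp hb with ⟨hb1, hb2⟩
      exact ⟨⟨hm, hb1⟩, by simpa using hb2⟩
    · rintro ⟨⟨hm, hb⟩, hy⟩
      exact ⟨hm, by rw [Bool.and_eq_true_iff]; exact ⟨hb, by simp [hy]⟩⟩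
  have hgrp_nodup : ∀ y, (G.getD y []).Nodup := by
    intro y; rw [hgrp]; exact (PySem.Set.nodup_ofList _).filter _
  have hKmem' : ∀ y, y ∈ G.keys ↔ ∃ d ∈ xs, yearOf d = y := by
    intro y
    rw [hG, hKmem y, PySem.Dict.keys_empty]
    simp only [List.not_mem_nil, false_or]
    constructor
    · rintro ⟨d, hd, hp, hy⟩; exact ⟨d, (hxs_mem d).mpr ⟨(PySem.Set.mem_ofList ad d).mp hd, hp⟩, hy⟩
    · rintro ⟨d, hd, hy⟩
      rcases (hxs_mem d).mp hd with ⟨h1, h2⟩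
      exact ⟨d, (PySem.Set.mem_ofList ad d).mpr h1, h2, hy⟩
  -- the representative of a year
  have hmax : ∀ y ∈ G.keys, ∃ m, PySem.List.max? (G.getD y []) (fun x : String => x) = some m ∧
      m ∈ xs ∧ yearOf m = y ∧ ∀ e ∈ xs, yearOf e = y → e ≤ m := by
    intro y hy
    rcases (hKmem' y).mp hy with ⟨d, hd, hdy⟩
    rcases hm : PySem.List.max? (G.getD y []) (fun x : String => x) with _ | m
    · rw [PySem.List.max?_eq_none_iff] at hm
      exact absurd ((hgrp_mem y d).mpr ⟨hd, hdy⟩) (by simp [hm])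
    · have hmem := PySem.List.max?_mem hm
      rcases (hgrp_mem y m).mp hmem with ⟨hm1, hm2⟩
      refine ⟨m, rfl, hm1, hm2, ?_⟩
      intro e he hey
      exact PySem.List.max?_isMax hm e ((hgrp_mem y e).mpr ⟨he, hey⟩)
  -- RI and PI membership
  have hRI : G.values.map (fun v => (PySem.List.max? v (fun x : String => x)).getD "") =
      G.keys.map (fun y => (PySem.List.max? (G.getD y []) (fun x : String => x)).getD "") := by
    rw [PySem.Dict.values_eq_map_keys G hKnd [], List.map_map]; rfl
  have hPI : G.values.flatMap (fun v =>
        v.filter (fun x => decide (x ≠ (PySem.List.max? v (fun y : String => y)).getD ""))) =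
      G.keys.flatMap (fun y => (G.getD y []).filter
        (fun x => decide (x ≠ (PySem.List.max? (G.getD y []) (fun z : String => z)).getD ""))) := by
    rw [PySem.Dict.values_eq_map_keys G hKnd [], List.flatMap_map]
  -- membership and nodup of the representatives list
  set RI := G.keys.map (fun y => (PySem.List.max? (G.getD y []) (fun x : String => x)).getD "") with hRIdef
  have hRI_mem : ∀ d, d ∈ RI ↔ d ∈ xs ∧ ∀ e ∈ xs, yearOf e = yearOf d → e ≤ d := by
    intro d
    rw [hRIdef, List.mem_map]
    constructor
    · rintro ⟨y, hy, hd⟩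
      rcases hmax y hy with ⟨m, hm, hm1, hm2, hm3⟩
      rw [hm] at hd
      simp only [Option.getD_some] at hd
      subst hd
      exact ⟨hm1, fun e he hey => hm3 e he (hm2 ▸ hey)⟩
    · rintro ⟨hd, hall⟩
      have hy : yearOf d ∈ G.keys := (hKmem' _).mpr ⟨d, hd, rfl⟩
      refine ⟨yearOf d, hy, ?_⟩
      rcases hmax _ hy with ⟨m, hm, hm1, hm2, hm3⟩
      rw [hm]
      simp only [Option.getD_some]
      exact le_antisymm (hall m hm1 hm2) (hm3 d hd rfl)
  have hRI_nodup : RI.Nodup := by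
    rw [hRIdef]
    refine List.Nodup.map_on ?_ hKnd
    intro y1 h1 y2 h2 heq
    rcases hmax y1 h1 with ⟨m1, hm1, _, hy1, _⟩
    rcases hmax y2 h2 with ⟨m2, hm2, _, hy2, _⟩
    rw [hm1, hm2] at heq
    simp only [Option.getD_some] at heq
    rw [← hy1, ← hy2, heq]
  -- membership and nodup of the pool list
  set PI := G.keys.flatMap (fun y => (G.getD y []).filter
      (fun x => decide (x ≠ (PySem.List.max? (G.getD y []) (fun z : String => z)).getD ""))) with hPIdef
  have hPI_mem : ∀ d, d ∈ PI ↔ d ∈ xs ∧ ∃ e ∈ xs, yearOf e = yearOf d ∧ d < e := by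
    intro d
    rw [hPIdef, List.mem_flatMap]
    constructor
    · rintro ⟨y, hy, hd⟩
      rw [List.mem_filter] at hd
      rcases hd with ⟨hd, hne⟩
      rcases (hgrp_mem y d).mp hd with ⟨hdx, hdy⟩
      rcases hmax y hy with ⟨m, hm, hm1, hm2, hm3⟩
      rw [hm] at hne
      simp only [Option.getD_some, decide_eq_true_eq] at hne
      refine ⟨hdx, m, hm1, by rw [hm2, hdy], ?_⟩
      exact lt_of_le_of_ne (hm3 d hdx hdy) hne
    · rintro ⟨hd, e, he, hey, hlt⟩
      have hy : yearOf d ∈ G.keys := (hKmem' _).mpr ⟨d, hd, rfl⟩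
      refine ⟨yearOf d, hy, ?_⟩
      rw [List.mem_filter]
      refine ⟨(hgrp_mem _ d).mpr ⟨hd, rfl⟩, ?_⟩
      rcases hmax _ hy with ⟨m, hm, hm1, hm2, hm3⟩
      rw [hm]
      simp only [Option.getD_some, decide_eq_true_eq]
      intro hdm
      have : e ≤ m := hm3 e he hey
      rw [← hdm] at this
      exact absurd (lt_of_lt_of_le hlt this) (lt_irrefl d)
  have hPI_nodup : PI.Nodup := by
    rw [hPIdef, List.nodup_flatMap]
    constructor
    · intro y _; exact (hgrp_nodup y).filter _
    · refine hKnd.imp_of_mem ?_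
      intro y1 y2 h1 h2 hne d hd1 hd2
      rw [List.mem_filter] at hd1 hd2
      rcases (hgrp_mem y1 d).mp hd1.1 with ⟨_, hdy1⟩
      rcases (hgrp_mem y2 d).mp hd2.1 with ⟨_, hdy2⟩
      exact hne (hdy1 ▸ hdy2 ▸ rfl)
  -- the split streams
  have hempty : ∀ d : String, yearOf d ∉ (PySem.Set.empty : PySem.Set String) := by
    intro d; simp [PySem.Set.empty]
  have hF_mem : ∀ d, d ∈ splitF PySem.Set.empty xs ↔
      d ∈ xs ∧ ∀ e ∈ xs, yearOf e = yearOf d → e ≤ d := by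
    intro d
    rw [mem_splitF xs PySem.Set.empty d hxs_pw]
    exact ⟨fun ⟨h1, _, h3⟩ => ⟨h1, h3⟩, fun ⟨h1, h3⟩ => ⟨h1, hempty d, h3⟩⟩
  have hR_mem : ∀ d, d ∈ splitR PySem.Set.empty xs ↔
      d ∈ xs ∧ ∃ e ∈ xs, yearOf e = yearOf d ∧ d < e := by
    intro d
    rw [mem_splitR xs PySem.Set.empty d hxs_pw]
    constructor
    · rintro ⟨h1, h2 | h2⟩
      · exact absurd h2 (hempty d)
      · exact ⟨h1, h2⟩
    · rintro ⟨h1, h2⟩; exact ⟨h1, Or.inr h2⟩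
  have hF : PySem.List.sorted RI (fun x : String => x) true = splitF PySem.Set.empty xs := by
    apply PySem.List.sorted_rev_eq_of_perm_of_pairwise_gt
    · rw [List.perm_ext_iff_of_nodup (((splitF_sublist _ xs).nodup) hxs_nodup) hRI_nodup]
      intro d; rw [hF_mem d, hRI_mem d]
    · exact List.Pairwise.sublist (splitF_sublist _ xs) hxs_pw
  have hR : PySem.List.sorted PI (fun x : String => x) true = splitR PySem.Set.empty xs := by
    apply PySem.List.sorted_rev_eq_of_perm_of_pairwise_gt
    · rw [List.perm_ext_iff_of_nodup (((splitR_sublist _ xs).nodup) hxs_nodup) hPI_nodup]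
      intro d; rw [hR_mem d, hPI_mem d]
    · exact List.Pairwise.sublist (splitR_sublist _ xs) hxs_pw
  -- put the two ports side by side
  simp only [select_dates, select_dates_alt]
  simp only [← hG, ← hxs, hRI, hPI, hF, hR]
  rw [foldA_eq]
  simp only [List.nil_append]
  rw [selFillA_eq_selFillB]


-- ===== VERDICT (by name: the statement is the Claim_ definition above) =====
theorem select_dates_spec : Claim_equal_select_dates := by
  intro ad mn mx t _
  unfold Spec_select_dates
  exact ports_agree ad mn mx t
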